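-- pv_equiv track=rewrite | github.com/LVQT-ss/into-python | CODEWAR_CHALLENGE/7kyu/Share_bit_counter.py | shared_bits
-- ===== SOURCE A (Python) =====
-- def shared_bits(a, b):
--     # Convert integers a and b to binary strings
--     n1_b = "{0:b}".format(a)
--     n2_b = "{0:b}".format(b)
--
--     # Find the length of the longest binary string
--     longest_length = max(len(n1_b), len(n2_b))
--
--     # Pad both binary strings with leading zeros to make them equal in length
--     n1_b = n1_b.rjust(longest_length, '0')
--     n2_b = n2_b.rjust(longest_length, '0')
--
--     # Initialize a counter to keep track of shared '1' bits
--     shared_count = 0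
--
--     # Iterate through each bit position and check for shared '1' bits
--     for i in range(longest_length):
--         if n1_b[i] == '1' and n2_b[i] == '1':
--             shared_count += 1
--
--     # Check if there are at least 2 shared '1' bits
--     return shared_count >= 2
-- ===== SOURCE B (Python) =====
-- def shared_bits(a, b):
--     # A's "{0:b}".format is sign+magnitude and rjust aligns magnitudes at the
--     # right, so A counts the shared set bits of the magnitudes; do that directly.
--     c = abs(a) & abs(b)
--     count = 0
--     while c:
--         count += c & 1
--         c >>= 1
--     return count >= 2
-- ===== Notes on version B (the rewrite author's own statement) =====
-- stated objective: idiomatic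
-- what changed: Replaces building two padded binary strings and scanning them character by character with a single bitwise AND of the magnitudes followed by a shift-and-mask popcount loop; no strings are built at all.
import Mathlib
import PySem

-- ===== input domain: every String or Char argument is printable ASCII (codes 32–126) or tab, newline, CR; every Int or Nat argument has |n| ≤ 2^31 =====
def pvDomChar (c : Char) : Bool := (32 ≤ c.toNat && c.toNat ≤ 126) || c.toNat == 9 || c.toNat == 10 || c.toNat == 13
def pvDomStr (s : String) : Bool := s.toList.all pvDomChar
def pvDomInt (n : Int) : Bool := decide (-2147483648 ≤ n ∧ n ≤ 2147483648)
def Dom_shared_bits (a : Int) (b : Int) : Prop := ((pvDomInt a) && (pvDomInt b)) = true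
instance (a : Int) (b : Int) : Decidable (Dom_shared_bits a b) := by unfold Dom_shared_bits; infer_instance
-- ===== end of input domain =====

-- B replaces A's padded-binary-string scan with a bitwise AND of the magnitudes
-- and a shift-and-mask popcount loop (idiomatic; no strings built).

-- ===== PORT A =====
-- "{0:b}".format(n) for a Nat: most-significant bit first, "0" for 0.
def pvGoBin (n : Nat) : List Char :=
  if h : n = 0 then []
  else pvGoBin (n / 2) ++ [if n % 2 = 1 then '1' else '0']
decreasing_by exact Nat.div_lt_self (Nat.pos_of_ne_zero h) one_lt_two

def pvFmtNat (n : Nat) : List Char := if n = 0 then ['0'] else pvGoBin n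

-- "{0:b}".format for an int: '-' sign then the magnitude's binary digits.
def pvFmtInt (i : Int) : List Char :=
  if i < 0 then '-' :: pvFmtNat i.natAbs else pvFmtNat i.natAbs

-- s.rjust(L, '0')
def pvRjust (s : List Char) (L : Nat) : List Char := List.replicate (L - s.length) '0' ++ s

def shared_bits (a : Int) (b : Int) : Bool :=
  let n1b := pvFmtInt a
  let n2b := pvFmtInt b
  let longest := max n1b.length n2b.length
  let p1 := pvRjust n1b longest
  let p2 := pvRjust n2b longest
  let cnt := (PySem.List.pyRange 0 (longest : Int) 1).foldl
    (fun c i => if PySem.List.pyGetD p1 i '?' = '1' ∧ PySem.List.pyGetD p2 i '?' = '1'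
                then c + 1 else c) (0 : Nat)
  decide (cnt ≥ 2)

-- ===== PORT B =====
-- while c: count += c & 1; c >>= 1
def pvBitLoop (c count : Nat) : Nat :=
  if h : c = 0 then count
  else pvBitLoop (c >>> 1) (count + (c &&& 1))
decreasing_by
  simp only [Nat.shiftRight_one]
  exact Nat.div_lt_self (Nat.pos_of_ne_zero h) one_lt_two

def shared_bits_alt (a : Int) (b : Int) : Bool :=
  -- abs(a) & abs(b): both operands nonnegative, so Python's & is Nat.land
  let c := a.natAbs &&& b.natAbs
  decide (pvBitLoop c 0 ≥ 2)

-- ===== PRECONDITION & SPEC =====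
def Spec_shared_bits (a : Int) (b : Int) (out : Bool) : Prop := out = shared_bits_alt a b
instance (a : Int) (b : Int) (out : Bool) : Decidable (Spec_shared_bits a b out) := by unfold Spec_shared_bits; infer_instance

-- ===== CLAIM (what is proved, stated in full; the proofs are below) =====
def Claim_equal_shared_bits : Prop := ∀ (a : Int) (b : Int), Dom_shared_bits a b → Spec_shared_bits a b (shared_bits a b)

-- ===== LEMMAS AND PROOFS =====

-- binary digits, least-significant first ([] for 0)
def pvBits (n : Nat) : List Char :=
  if h : n = 0 then []
  else (if n % 2 = 1 then '1' else '0') :: pvBits (n / 2)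
decreasing_by exact Nat.div_lt_self (Nat.pos_of_ne_zero h) one_lt_two

-- shared set bits, recursively over both lsb streams
def pvShared (x y : Nat) : Nat :=
  if h : x = 0 ∨ y = 0 then 0
  else (if x % 2 = 1 ∧ y % 2 = 1 then 1 else 0) + pvShared (x / 2) (y / 2)
decreasing_by
  exact Nat.div_lt_self (Nat.pos_of_ne_zero (fun hx => h (Or.inl hx))) one_lt_two

-- popcount
def pvBitc (n : Nat) : Nat :=
  if h : n = 0 then 0
  else n % 2 + pvBitc (n / 2)
decreasing_by exact Nat.div_lt_self (Nat.pos_of_ne_zero h) one_lt_two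

def pvBoth1 : Char × Char → Bool := fun p => decide (p.1 = '1' ∧ p.2 = '1')

lemma pvGoBin_eq_rev (n : Nat) : pvGoBin n = (pvBits n).reverse := by
  induction n using Nat.strong_induction_on with
  | _ n ih =>
    rw [pvGoBin, pvBits]
    by_cases h : n = 0
    · simp [h]
    · simp only [h, dif_neg, not_false_iff]
      rw [ih (n / 2) (Nat.div_lt_self (Nat.pos_of_ne_zero h) one_lt_two)]
      simp

lemma pvFoldlCnt {α : Type} (P : α → Prop) [DecidablePred P] :
    ∀ (l : List α) (c : Nat),
      l.foldl (fun c x => if P x then c + 1 else c) c = c + l.countP (fun x => decide (P x)) := by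
  intro l
  induction l with
  | nil => simp
  | cons x l ih =>
    intro c
    simp only [List.foldl_cons, List.countP_cons, ih]
    by_cases h : P x <;> simp [h] <;> omega

lemma pvCntRangeZip :
    ∀ (s t : List Char), t.length = s.length →
      (List.range s.length).countP
        (fun k => decide (s.getD k '?' = '1' ∧ t.getD k '?' = '1'))
      = (s.zip t).countP pvBoth1 := by
  intro s
  induction s with
  | nil => intro t h; simp
  | cons a s ih =>
    intro t h
    cases t with
    | nil => simp at h
    | cons b t =>
      simp only [List.length_cons] at h ⊢
      rw [List.range_succ_eq_map]
      simp only [List.countP_cons, List.countP_map, List.zip_cons_cons,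
        Function.comp_def, List.getD_cons_succ, List.getD_cons_zero]
      rw [ih t (by omega)]
      simp [pvBoth1]

lemma pvZipJunkLeft (p : List Char) (hp : ∀ c ∈ p, c ≠ '1') :
    ∀ w : List Char, (p.zip w).countP pvBoth1 = 0 := by
  induction p with
  | nil => intro w; simp
  | cons c p ih =>
    intro w
    cases w with
    | nil => simp
    | cons d w =>
      simp only [List.zip_cons_cons, List.countP_cons]
      have h1 : c ≠ '1' := hp c (by simp)
      have : pvBoth1 (c, d) = false := by simp [pvBoth1, h1]
      rw [this, ih (fun x hx => hp x (by simp [hx]))]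
      simp

lemma pvZipJunkRight (q : List Char) (hq : ∀ c ∈ q, c ≠ '1') :
    ∀ u : List Char, (u.zip q).countP pvBoth1 = 0 := by
  induction q with
  | nil => intro u; simp
  | cons d q ih =>
    intro u
    cases u with
    | nil => simp
    | cons c u =>
      simp only [List.zip_cons_cons, List.countP_cons]
      have h1 : d ≠ '1' := hq d (by simp)
      have : pvBoth1 (c, d) = false := by simp [pvBoth1, h1]
      rw [this, ih (fun x hx => hq x (by simp [hx]))]
      simp

lemma pvZipAppendJunk :
    ∀ (u v p q : List Char), (∀ c ∈ p, c ≠ '1') → (∀ c ∈ q, c ≠ '1') →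
      ((u ++ p).zip (v ++ q)).countP pvBoth1 = (u.zip v).countP pvBoth1 := by
  intro u
  induction u with
  | nil =>
    intro v p q hp _
    simp only [List.nil_append, List.zip_nil_left, List.countP_nil]
    exact pvZipJunkLeft p hp _
  | cons a u ih =>
    intro v p q hp hq
    cases v with
    | nil =>
      simp only [List.nil_append, List.zip_nil_right, List.countP_nil]
      exact pvZipJunkRight q hq _
    | cons b v =>
      simp only [List.cons_append, List.zip_cons_cons, List.countP_cons, ih v p q hp hq]

lemma pvZipRevCnt :
    ∀ (s t : List Char), s.length = t.length →
      (s.reverse.zip t.reverse).countP pvBoth1 = (s.zip t).countP pvBoth1 := by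
  intro s
  induction s with
  | nil => intro t h; simp
  | cons a s ih =>
    intro t h
    cases t with
    | nil => simp at h
    | cons b t =>
      simp only [List.length_cons] at h
      have hl : s.reverse.length = t.reverse.length := by simp; omega
      simp only [List.reverse_cons, List.zip_cons_cons, List.countP_cons]
      rw [List.zip_append hl, List.countP_append, ih t (by omega)]
      simp

lemma pvBits_zero : pvBits 0 = [] := by rw [pvBits]; rfl

lemma pvBits_cons {n : Nat} (h : n ≠ 0) :
    pvBits n = (if n % 2 = 1 then '1' else '0') :: pvBits (n / 2) := by
  rw [pvBits]; simp [h]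

lemma pvBitsZip : ∀ (x y : Nat), ((pvBits x).zip (pvBits y)).countP pvBoth1 = pvShared x y := by
  intro x
  induction x using Nat.strong_induction_on with
  | _ x ih =>
    intro y
    rw [pvShared]
    by_cases hx : x = 0
    · simp [hx, pvBits_zero]
    · by_cases hy : y = 0
      · simp [hx, hy, pvBits_zero]
      · simp only [hx, hy, or_self, dif_neg, not_false_iff]
        rw [pvBits_cons hx, pvBits_cons hy, List.zip_cons_cons, List.countP_cons,
          ih (x / 2) (Nat.div_lt_self (Nat.pos_of_ne_zero hx) one_lt_two) (y / 2)]
        have hb : pvBoth1 ((if x % 2 = 1 then '1' else '0'), (if y % 2 = 1 then '1' else '0'))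
            = decide (x % 2 = 1 ∧ y % 2 = 1) := by
          by_cases h1 : x % 2 = 1 <;> by_cases h2 : y % 2 = 1 <;> simp [pvBoth1, h1, h2]
        rw [hb]
        by_cases h1 : x % 2 = 1 ∧ y % 2 = 1 <;> simp [h1] <;> omega

lemma pvAndMod2 (x y : Nat) : (x &&& y) % 2 = if x % 2 = 1 ∧ y % 2 = 1 then 1 else 0 := by
  have h := Nat.testBit_and x y 0
  simp only [Nat.testBit_zero] at h
  rcases Nat.mod_two_eq_zero_or_one (x &&& y) with h0 | h0 <;>
    rcases Nat.mod_two_eq_zero_or_one x with h1 | h1 <;>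
      rcases Nat.mod_two_eq_zero_or_one y with h2 | h2 <;>
        simp [h0, h1, h2] at h ⊢

lemma pvBitc_step (n : Nat) : pvBitc n = n % 2 + pvBitc (n / 2) := by
  by_cases h : n = 0
  · subst h; rw [pvBitc]; simp [pvBitc]
  · rw [pvBitc]; simp [h]

lemma pvShared_eq_bitc : ∀ (x y : Nat), pvShared x y = pvBitc (x &&& y) := by
  intro x
  induction x using Nat.strong_induction_on with
  | _ x ih =>
    intro y
    rw [pvShared]
    by_cases hx : x = 0
    · simp [hx, Nat.zero_and, pvBitc]
    · by_cases hy : y = 0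
      · rw [dif_pos (Or.inr hy), hy, Nat.and_zero, pvBitc]; rfl
      · simp only [hx, hy, or_self, dif_neg, not_false_iff]
        rw [ih (x / 2) (Nat.div_lt_self (Nat.pos_of_ne_zero hx) one_lt_two) (y / 2)]
        rw [← Nat.and_div_two, ← pvAndMod2 x y, ← pvBitc_step]

lemma pvBitLoop_eq : ∀ (c k : Nat), pvBitLoop c k = k + pvBitc c := by
  intro c
  induction c using Nat.strong_induction_on with
  | _ c ih =>
    intro k
    rw [pvBitLoop, pvBitc]
    by_cases h : c = 0
    · simp [h]
    · simp only [h, dif_neg, not_false_iff]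
      have hlt : c >>> 1 < c := by
        rw [Nat.shiftRight_one]
        exact Nat.div_lt_self (Nat.pos_of_ne_zero h) one_lt_two
      rw [ih (c >>> 1) hlt, Nat.shiftRight_one, Nat.and_one_is_mod, Nat.add_assoc]

-- the reverse of a formatted int is its magnitude's lsb-first bits followed by junk (no '1')
lemma pvFmtInt_rev (a : Int) :
    ∃ j : List Char, (pvFmtInt a).reverse = pvBits a.natAbs ++ j ∧ ∀ c ∈ j, c ≠ '1' := by
  have hnat : ∀ n : Nat, ∃ j : List Char,
      (pvFmtNat n).reverse = pvBits n ++ j ∧ ∀ c ∈ j, c ≠ '1' := by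
    intro n
    by_cases h : n = 0
    · exact ⟨['0'], by simp [h, pvFmtNat, pvBits], by intro c hc; simp at hc; simp [hc]⟩
    · refine ⟨[], ?_, by simp⟩
      simp [pvFmtNat, h, pvGoBin_eq_rev]
  unfold pvFmtInt
  by_cases hneg : a < 0
  · obtain ⟨j, hj, hj1⟩ := hnat a.natAbs
    refine ⟨j ++ ['-'], ?_, ?_⟩
    · simp only [hneg, if_pos, List.reverse_cons, hj, List.append_assoc]
    · intro c hc
      rcases List.mem_append.mp hc with h | h
      · exact hj1 c h
      · simp at h; simp [h]
  · simpa [hneg] using hnat a.natAbs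

-- the count A computes is the shared-bit count of the magnitudes
lemma pvCntEq (a b : Int) :
    ((PySem.List.pyRange 0 ((max (pvFmtInt a).length (pvFmtInt b).length : Nat) : Int) 1).foldl
      (fun c i => if PySem.List.pyGetD (pvRjust (pvFmtInt a) (max (pvFmtInt a).length (pvFmtInt b).length)) i '?' = '1'
                    ∧ PySem.List.pyGetD (pvRjust (pvFmtInt b) (max (pvFmtInt a).length (pvFmtInt b).length)) i '?' = '1'
                  then c + 1 else c) (0 : Nat))
    = pvShared a.natAbs b.natAbs := by
  set L := max (pvFmtInt a).length (pvFmtInt b).length with hL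
  set p1 := pvRjust (pvFmtInt a) L with hp1
  set p2 := pvRjust (pvFmtInt b) L with hp2
  have hlen1 : p1.length = L := by
    have : (pvFmtInt a).length ≤ L := le_max_left _ _
    simp [hp1, pvRjust]; omega
  have hlen2 : p2.length = L := by
    have : (pvFmtInt b).length ≤ L := le_max_right _ _
    simp [hp2, pvRjust]; omega
  -- fold over pyRange → countP over List.range
  rw [PySem.List.pyRange_one]
  simp only [Int.sub_zero, Int.toNat_natCast, List.foldl_map]
  have hget : ∀ (s : List Char) (k : Nat),
      PySem.List.pyGetD s ((0 : Int) + (k : Int)) '?' = s.getD k '?' := by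
    intro s k
    rw [Int.zero_add, PySem.List.pyGetD_natCast]
  simp only [hget]
  rw [pvFoldlCnt (fun k => p1.getD k '?' = '1' ∧ p2.getD k '?' = '1')]
  rw [Nat.zero_add]
  -- index count → zip count
  rw [show L = p1.length from hlen1.symm, pvCntRangeZip p1 p2 (by rw [hlen1, hlen2])]
  -- zip count → reversed zip count
  rw [← pvZipRevCnt p1 p2 (by rw [hlen1, hlen2])]
  -- reversed padded strings are lsb bits followed by junk
  obtain ⟨j1, hj1, hj1'⟩ := pvFmtInt_rev a
  obtain ⟨j2, hj2, hj2'⟩ := pvFmtInt_rev b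
  have hrev1 : p1.reverse = pvBits a.natAbs ++ (j1 ++ List.replicate (L - (pvFmtInt a).length) '0') := by
    simp [hp1, pvRjust, hj1]
  have hrev2 : p2.reverse = pvBits b.natAbs ++ (j2 ++ List.replicate (L - (pvFmtInt b).length) '0') := by
    simp [hp2, pvRjust, hj2]
  rw [hrev1, hrev2, pvZipAppendJunk _ _ _ _ ?hp ?hq, pvBitsZip]
  case hp =>
    intro c hc
    rcases List.mem_append.mp hc with h | h
    · exact hj1' c h
    · have := List.eq_of_mem_replicate h
      simp [this]
  case hq =>
    intro c hc
    rcases List.mem_append.mp hc with h | h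
    · exact hj2' c h
    · have := List.eq_of_mem_replicate h
      simp [this]

-- ===== VERDICT (by name: the statement is the Claim_ definition above) =====
theorem shared_bits_spec : Claim_equal_shared_bits := by
  intro a b _
  show shared_bits a b = shared_bits_alt a b
  simp only [shared_bits, shared_bits_alt]
  rw [pvCntEq a b, pvShared_eq_bitc, pvBitLoop_eq, Nat.zero_add]
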